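-- pv_equiv track=rewrite | github.com/RuoZhouH/drl_bases | test8.py | longestSubList
-- ===== SOURCE A (Python) =====
-- def longestSubList(ls):
--     subList = []
--     maxLenth = 0
--     for i in range(len(ls)):
--         tempLs = ls[i:]
--         subLs1 = findSub(tempLs)
--         subLs2 = findMinSub(tempLs)
--
--         if len(subLs1) > len(subLs2):
--             finalSubLs = subLs1
--         else:
--             finalSubLs = subLs2
--
--         if len(finalSubLs) >= maxLenth:
--             maxLenth = len(finalSubLs)
--             subList = finalSubLs
--
--     return subList
--
-- def findSub(ls):
--     subLs = [ls[0]]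
--     startPoint = ls[0]
--     for i in ls:
--         if i > startPoint:
--             subLs.append(i)
--             startPoint = i
--
--     return subLs
--
-- def findMinSub(ls):
--     subLs = [ls[0]]
--     startPoint = ls[0]
--     for i in range(len(ls)):
--         subTempLs = ls[i:]
--         minPoint = min(subTempLs)
--         if minPoint > startPoint:
--             subLs.append(minPoint)
--             startPoint = minPoint
--     return subLs
-- ===== SOURCE B (Python) =====
-- def _ext(x, vs):
--     # greedy: x followed by each value strictly greater than the last kept one
--     out = [x]
--     p = x
--     for v in vs:
--         if v > p:
--             out.append(v)
--             p = v
--     return out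
--
-- def longestSubList(ls):
--     # Precompute suffix minima once (O(n)); each suffix is then handled in O(n),
--     # instead of A's O(n) min() per inner index (O(n^3) total).
--     suffmin = []
--     cur = None
--     for v in reversed(ls):
--         cur = v if (cur is None or v < cur) else cur
--         suffmin.append(cur)
--     suffmin.reverse()
--     best = []
--     for i in range(len(ls)):
--         x = ls[i]
--         s1 = _ext(x, ls[i+1:])        # == findSub(ls[i:])
--         s2 = _ext(x, suffmin[i+1:])   # == findMinSub(ls[i:])
--         c = s1 if len(s1) > len(s2) else s2
--         if len(c) >= len(best):
--             best = c
--     return best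
-- ===== Notes on version B (the rewrite author's own statement) =====
-- stated objective: faster
-- what changed: Replaces findMinSub's per-index min() over a fresh slice with a single precomputed suffix-minimum array shared by all suffixes, and inlines both greedy scans into one pass per suffix, dropping the cost from O(n^3) to O(n^2).
import Mathlib
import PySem

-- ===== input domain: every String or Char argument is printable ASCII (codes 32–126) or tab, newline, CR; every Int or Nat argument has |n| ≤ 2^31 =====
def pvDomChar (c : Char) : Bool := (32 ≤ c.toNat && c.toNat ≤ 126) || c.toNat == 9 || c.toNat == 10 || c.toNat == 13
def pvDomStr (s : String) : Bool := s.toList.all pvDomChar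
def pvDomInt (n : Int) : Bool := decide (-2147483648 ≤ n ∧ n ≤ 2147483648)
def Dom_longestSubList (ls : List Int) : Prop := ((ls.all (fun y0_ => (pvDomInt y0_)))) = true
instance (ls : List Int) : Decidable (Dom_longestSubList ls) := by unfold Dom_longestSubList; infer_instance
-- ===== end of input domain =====

-- B replaces findMinSub's per-index min() over a fresh slice by one precomputed
-- suffix-minimum array shared by all suffixes (O(n^3) -> O(n^2)); proved equal on Dom.


-- ===== PORT A =====
-- findSub: Python raises IndexError on []; A only calls it on nonempty suffixes,
-- so the [] branch is unreachable from longestSubList.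
def findSub (ls : List Int) : List Int :=
  match ls with
  | [] => []
  | x :: _ =>
    (ls.foldl (fun (st : List Int × Int) i =>
      if i > st.2 then (st.1 ++ [i], i) else st) ([x], x)).1

def findMinSub (ls : List Int) : List Int :=
  match ls with
  | [] => []
  | x :: _ =>
    ((PySem.List.pyRange 0 (ls.length : Int) 1).foldl (fun (st : List Int × Int) i =>
      let subTempLs := PySem.List.slice ls (some i) none
      let minPoint := (PySem.List.min? subTempLs (fun y => y)).getD 0
      if minPoint > st.2 then (st.1 ++ [minPoint], minPoint) else st) ([x], x)).1

def longestSubList (ls : List Int) : List Int :=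
  ((PySem.List.pyRange 0 (ls.length : Int) 1).foldl (fun (st : List Int × Int) i =>
    let tempLs := PySem.List.slice ls (some i) none
    let subLs1 := findSub tempLs
    let subLs2 := findMinSub tempLs
    let finalSubLs := if subLs1.length > subLs2.length then subLs1 else subLs2
    if (finalSubLs.length : Int) ≥ st.2 then (finalSubLs, (finalSubLs.length : Int)) else st)
    ([], 0)).1

-- ===== PORT B =====
-- _ext in Source B
def extGreedy (x : Int) (vs : List Int) : List Int :=
  (vs.foldl (fun (st : List Int × Int) v =>
    if v > st.2 then (st.1 ++ [v], v) else st) ([x], x)).1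

-- the suffix-minimum array built backwards in Source B
def suffMins (ls : List Int) : List Int :=
  ((ls.reverse.foldl (fun (st : List Int × Option Int) v =>
    let cur := match st.2 with
      | none => v
      | some c => if v < c then v else c
    (st.1 ++ [cur], some cur)) ([], none)).1).reverse

def longestSubList_alt (ls : List Int) : List Int :=
  let suffmin := suffMins ls
  (PySem.List.pyRange 0 (ls.length : Int) 1).foldl (fun (best : List Int) i =>
    let x := (PySem.List.pyGet? ls i).getD 0
    let s1 := extGreedy x (PySem.List.slice ls (some (i + 1)) none)
    let s2 := extGreedy x (PySem.List.slice suffmin (some (i + 1)) none)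
    let c := if s1.length > s2.length then s1 else s2
    if c.length ≥ best.length then c else best) []

-- ===== PRECONDITION & SPEC =====
def Spec_longestSubList (ls : List Int) (out : List Int) : Prop := out = longestSubList_alt ls
instance (ls : List Int) (out : List Int) : Decidable (Spec_longestSubList ls out) := by unfold Spec_longestSubList; infer_instance

-- ===== CLAIM (what is proved, stated in full; the proofs are below) =====
def Claim_equal_longestSubList : Prop := ∀ (ls : List Int), Dom_longestSubList ls → Spec_longestSubList ls (longestSubList ls)

-- ===== LEMMAS AND PROOFS =====

def tailMins : List Int → List Int
  | [] => []
  | a :: l =>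
    (match tailMins l with
     | [] => a
     | b :: _ => if a < b then a else b) :: tailMins l

theorem suffMins_foldr (ls : List Int) :
    ls.foldr (fun v (st : List Int × Option Int) =>
      ((st.1 ++ [match st.2 with | none => v | some c => if v < c then v else c],
        some (match st.2 with | none => v | some c => if v < c then v else c)) : List Int × Option Int))
      ([], none)
    = ((tailMins ls).reverse, (tailMins ls).head?) := by
  induction ls with
  | nil => rfl
  | cons a l ih =>
    simp only [List.foldr_cons, ih, tailMins]
    cases h : tailMins l <;> simp

theorem suffMins_eq (ls : List Int) : suffMins ls = tailMins ls := by
  unfold suffMins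
  rw [List.foldl_reverse]
  have := suffMins_foldr ls
  simp only [this]
  exact List.reverse_reverse _

theorem tailMins_length (ls : List Int) : (tailMins ls).length = ls.length := by
  induction ls with
  | nil => rfl
  | cons a l ih => simp [tailMins, ih]

theorem tailMins_drop (k : Nat) (ls : List Int) : (tailMins ls).drop k = tailMins (ls.drop k) := by
  induction k generalizing ls with
  | zero => simp
  | succ n ih =>
    cases ls with
    | nil => rfl
    | cons a l => simpa [tailMins] using ih l

theorem foldl_min_comm (l : List Int) (a b : Int) :
    l.foldl min (min a b) = min a (l.foldl min b) := by
  induction l generalizing a b with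
  | nil => simp
  | cons c t ih => simp only [List.foldl_cons, min_assoc]; exact ih a (min b c)

theorem tailMins_cons (a : Int) (l : List Int) :
    tailMins (a :: l) = (l.foldl min a) :: tailMins l := by
  induction l generalizing a with
  | nil => rfl
  | cons b l' ih =>
    show (match tailMins (b :: l') with
      | [] => a
      | c :: _ => if a < c then a else c) :: tailMins (b :: l') = _
    rw [ih b]
    have h1 : (if a < l'.foldl min b then a else l'.foldl min b) = min a (l'.foldl min b) := by
      simp only [min_def]; split_ifs <;> omega
    have h2 : (b :: l').foldl min a = min a (l'.foldl min b) := by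
      simp only [List.foldl_cons]
      exact foldl_min_comm l' a b
    simp [h1, h2]

def extGreedyStep : (List Int × Int) → Int → (List Int × Int) :=
  fun st v => if v > st.2 then (st.1 ++ [v], v) else st

theorem findSub_cons (x : Int) (r : List Int) : findSub (x :: r) = extGreedy x r := by
  simp [findSub, extGreedy]

theorem foldl_min_le_init (l : List Int) (a : Int) : l.foldl min a ≤ a := by
  induction l generalizing a with
  | nil => simp
  | cons b t ih => exact le_trans (ih (min a b)) (min_le_left a b)

theorem min?_drop_getD (t : List Int) (k : Nat) (h : k < t.length) :
    (PySem.List.min? (t.drop k) (fun y => y)).getD 0 = (tailMins t).getD k 0 := by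
  have hd : t.drop k = t[k] :: t.drop (k + 1) := (List.getElem_cons_drop h).symm
  rw [hd, PySem.List.min?_id_cons]
  have h2 : (tailMins t).drop k = ((t.drop (k+1)).foldl min t[k]) :: tailMins (t.drop (k+1)) := by
    rw [tailMins_drop, hd, tailMins_cons]
  have h3 : (tailMins t)[k]? = some ((t.drop (k+1)).foldl min t[k]) := by
    have : ((tailMins t).drop k)[0]? = (tailMins t)[k]? := by
      simp [List.getElem?_drop (xs := tailMins t) (i := k) (j := 0)]
    rw [← this, h2]; rfl
  simp [List.getD, h3]

theorem findMinSub_cons (x : Int) (r : List Int) :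
    findMinSub (x :: r) = extGreedy x (tailMins r) := by
  have hdef : findMinSub (x :: r) = ((PySem.List.pyRange 0 ((x :: r).length : Int) 1).foldl
      (fun (st : List Int × Int) i =>
        if ((PySem.List.min? (PySem.List.slice (x :: r) (some i) none) (fun y => y)).getD 0) > st.2
        then (st.1 ++ [(PySem.List.min? (PySem.List.slice (x :: r) (some i) none) (fun y => y)).getD 0],
              (PySem.List.min? (PySem.List.slice (x :: r) (some i) none) (fun y => y)).getD 0)
        else st) ([x], x)).1 := rfl
  rw [hdef]
  have hcong : ((PySem.List.pyRange 0 ((x :: r).length : Int) 1).foldl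
      (fun (st : List Int × Int) i =>
        if ((PySem.List.min? (PySem.List.slice (x :: r) (some i) none) (fun y => y)).getD 0) > st.2
        then (st.1 ++ [(PySem.List.min? (PySem.List.slice (x :: r) (some i) none) (fun y => y)).getD 0],
              (PySem.List.min? (PySem.List.slice (x :: r) (some i) none) (fun y => y)).getD 0)
        else st) ([x], x))
      = ((PySem.List.pyRange 0 ((x :: r).length : Int) 1).foldl (fun st i =>
        extGreedyStep st (PySem.List.pyGetD (tailMins (x :: r)) i 0)) ([x], x)) := by
    apply PySem.List.foldl_congr_mem'
    intro i hi st
    rw [PySem.List.mem_pyRange_one] at hi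
    have h0 : 0 ≤ i := hi.1
    have h1 : i.toNat < (x :: r).length := by omega
    simp only [PySem.List.slice_from _ h0, min?_drop_getD _ _ h1,
      PySem.List.pyGetD_of_nonneg _ _ h0, extGreedyStep]
  rw [hcong]
  rw [show ((x :: r).length : Int) = ((tailMins (x :: r)).length : Int) by rw [tailMins_length]]
  rw [PySem.List.foldl_pyRange_zero_pyGetD' (tailMins (x :: r)) 0 extGreedyStep ([x], x)]
  rw [tailMins_cons]
  have hle : r.foldl min x ≤ x := foldl_min_le_init r x
  simp only [List.foldl_cons, extGreedyStep]
  rw [if_neg (by omega)]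
  rfl

theorem outer_fold (idxs : List Int) (f : Int → List Int) (b : List Int) :
    (idxs.foldl (fun (st : List Int × Int) i =>
        if ((f i).length : Int) ≥ st.2 then (f i, ((f i).length : Int)) else st)
      (b, (b.length : Int))).1
    = idxs.foldl (fun best i => if (f i).length ≥ best.length then f i else best) b := by
  induction idxs generalizing b with
  | nil => rfl
  | cons i l ih =>
    simp only [List.foldl_cons]
    by_cases h : (f i).length ≥ b.length
    · rw [if_pos (by exact_mod_cast h), if_pos h]; exact ih (f i)
    · rw [if_neg (by exact_mod_cast h), if_neg h]; exact ih b

def candA (ls : List Int) (i : Int) : List Int :=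
  if (findSub (PySem.List.slice ls (some i) none)).length > (findMinSub (PySem.List.slice ls (some i) none)).length
  then findSub (PySem.List.slice ls (some i) none)
  else findMinSub (PySem.List.slice ls (some i) none)

def candB (ls : List Int) (i : Int) : List Int :=
  let x := (PySem.List.pyGet? ls i).getD 0
  let s1 := extGreedy x (PySem.List.slice ls (some (i + 1)) none)
  let s2 := extGreedy x (PySem.List.slice (suffMins ls) (some (i + 1)) none)
  if s1.length > s2.length then s1 else s2

theorem cand_eq (ls : List Int) (i : Int) (h0 : 0 ≤ i) (h1 : i < (ls.length : Int)) :
    candA ls i = candB ls i := by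
  have hk : i.toNat < ls.length := by omega
  have hdrop : ls.drop i.toNat = ls[i.toNat] :: ls.drop (i.toNat + 1) := (List.getElem_cons_drop hk).symm
  have hslice : PySem.List.slice ls (some i) none = ls[i.toNat] :: ls.drop (i.toNat + 1) := by
    rw [PySem.List.slice_from _ h0, hdrop]
  have hs1 : PySem.List.slice ls (some (i + 1)) none = ls.drop (i.toNat + 1) := by
    rw [PySem.List.slice_from _ (by omega)]; congr 1; omega
  have hs2 : PySem.List.slice (suffMins ls) (some (i + 1)) none = tailMins (ls.drop (i.toNat + 1)) := by
    rw [PySem.List.slice_from _ (by omega), suffMins_eq, show (i + 1).toNat = i.toNat + 1 by omega,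
      tailMins_drop]
  have hget : (PySem.List.pyGet? ls i).getD 0 = ls[i.toNat] := by
    rw [PySem.List.pyGet?_eq_some_getElem ls h0 h1]; rfl
  simp only [candA, candB, hslice, hs1, hs2, hget, findSub_cons, findMinSub_cons]

-- ===== VERDICT (by name: the statement is the Claim_ definition above) =====
theorem longestSubList_spec : Claim_equal_longestSubList := by
  intro ls _
  unfold Spec_longestSubList
  have hdefA : longestSubList ls = ((PySem.List.pyRange 0 (ls.length : Int) 1).foldl
      (fun (st : List Int × Int) i =>
        if ((candA ls i).length : Int) ≥ st.2 then (candA ls i, ((candA ls i).length : Int)) else st)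
      (([] : List Int), ((([] : List Int).length : Int)))).1 := rfl
  rw [hdefA]
  have hcg := PySem.List.foldl_congr_mem' (PySem.List.pyRange 0 (ls.length : Int) 1)
      (fun (st : List Int × Int) i =>
        if ((candA ls i).length : Int) ≥ st.2 then (candA ls i, ((candA ls i).length : Int)) else st)
      (fun (st : List Int × Int) i =>
        if ((candB ls i).length : Int) ≥ st.2 then (candB ls i, ((candB ls i).length : Int)) else st)
      (([] : List Int), ((([] : List Int).length : Int)))
      (by intro i hi st
          rw [PySem.List.mem_pyRange_one] at hi
          simp only [cand_eq ls i hi.1 hi.2])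
  rw [hcg, outer_fold]
  rfl
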